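-- pv_equiv track=rewrite | github.com/BelovedSonOfGod/python_Graph | main.py | connectionDetection
-- ===== SOURCE A (Python) =====
-- from collections import deque
--
-- graph = {
--     "A": ["B"],
--     "B": ["A", "C"],
--     "C": ["B"],         # Componente 1: A-B-C
--
--     "D": ["E"],         # Componente 2: D-E
--     "E": ["D"],
--
--     "F": ["G", "H"],    # Componente 3: F-G-H
--     "G": ["F"],
--     "H": ["F"]
-- }
--
-- def connectionDetection(node1Value,node2Value)->True:
--     setOfAlreadyVisited = set()
--     stack=deque()
--     stack.append(node1Value) # Add the initial graph item
--     while stack: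
--         currentValue=stack.pop()
--         if currentValue in setOfAlreadyVisited:
--             continue
--         if currentValue==node2Value:
--             return True
--         stack.extend(graph[currentValue]) #Include all the neighbors
--         setOfAlreadyVisited.add(currentValue) #Check if the value has been already added
--     return False
-- ===== SOURCE B (Python) =====
-- # B: recursive DFS with an inner helper and a shared visited set,
-- # instead of A's explicit deque-as-stack loop.
-- graph = {
--     "A": ["B"],
--     "B": ["A", "C"],
--     "C": ["B"],
--
--     "D": ["E"],
--     "E": ["D"],
--
--     "F": ["G", "H"],
--     "G": ["F"],
--     "H": ["F"]
-- }
--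
-- def connectionDetection(node1Value, node2Value) -> True:
--     visited = set()
--     def dfs(node):
--         if node == node2Value:
--             return True
--         visited.add(node)
--         for n in graph[node]:
--             if n not in visited and dfs(n):
--                 return True
--         return False
--     return dfs(node1Value)
-- ===== Notes on version B (the rewrite author's own statement) =====
-- stated objective: alternative
-- what changed: Replaces A's iterative deque-as-stack while loop with a recursive inner dfs helper over a shared visited set, the neighbor loop short-circuiting on the first hit.
import Mathlib
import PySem

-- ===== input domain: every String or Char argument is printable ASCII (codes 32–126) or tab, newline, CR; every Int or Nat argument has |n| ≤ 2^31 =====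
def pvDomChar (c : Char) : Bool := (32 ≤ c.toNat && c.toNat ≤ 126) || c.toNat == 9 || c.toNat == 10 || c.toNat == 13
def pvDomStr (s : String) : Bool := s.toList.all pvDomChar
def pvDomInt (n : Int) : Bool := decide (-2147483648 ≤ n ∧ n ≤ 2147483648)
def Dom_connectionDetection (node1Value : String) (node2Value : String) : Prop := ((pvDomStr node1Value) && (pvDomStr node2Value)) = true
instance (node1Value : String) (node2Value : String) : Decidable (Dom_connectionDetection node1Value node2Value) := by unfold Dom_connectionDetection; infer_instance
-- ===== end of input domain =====

-- B replaces A's explicit deque-as-stack loop by a recursive DFS with an inner helper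
-- sharing a visited set (objective: alternative decomposition, same cost).

-- ===== PORT A =====
-- the module-level constant 'graph'
def pyGraph : PySem.Dict String (List String) :=
  PySem.Dict.ofList [("A", ["B"]), ("B", ["A", "C"]), ("C", ["B"]),
    ("D", ["E"]), ("E", ["D"]),
    ("F", ["G", "H"]), ("G", ["F"]), ("H", ["F"])]

-- A's while loop; the deque used as a stack is a List with its TOP at the HEAD
-- (append = cons, pop = uncons, extend(nbrs) = nbrs.reverse ++ ·, the same pop order).
-- fuel is only a totality guard: the fixed 8-node graph gives ≤ 11 iterations, so 32 is never
-- exhausted; 'none' from the dict lookup is Python's KeyError (excluded by Pre_), ported as false.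
def connLoop : Nat → PySem.Set String → List String → String → Bool
  | _, _, [], _ => false                 -- while stack: exit → return False
  | 0, _, _ :: _, _ => false             -- fuel guard (unreachable on this fixed graph)
  | fuel+1, visited, current :: rest, node2Value =>
    if PySem.Set.contains visited current then
      connLoop fuel visited rest node2Value                    -- continue
    else if current == node2Value then true                    -- return True
    else match pyGraph.get? current with
      | none => false                                          -- KeyError (outside Pre_)
      | some nbrs => connLoop fuel (PySem.Set.add visited current) (nbrs.reverse ++ rest) node2Value

def connectionDetection (node1Value : String) (node2Value : String) : Bool :=
  connLoop 32 PySem.Set.empty [node1Value] node2Value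

-- ===== PORT B =====
-- Source B's inner 'dfs' (dfsB) and its for-loop over the neighbors (dfsList); the shared mutable
-- 'visited' set is threaded through as state. Same fuel guard and KeyError convention as A's port.
mutual
def dfsB : Nat → String → PySem.Set String → String → Bool × PySem.Set String
  | fuel, node, visited, node2Value =>
    if node == node2Value then (true, visited)
    else match fuel with
      | 0 => (false, visited)            -- fuel guard (unreachable on this fixed graph)
      | fuel+1 =>
        let visited' := PySem.Set.add visited node
        match pyGraph.get? node with
        | none => (false, visited')                            -- KeyError (outside Pre_)
        | some nbrs => dfsList fuel nbrs visited' node2Value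
  termination_by fuel _ _ _ => (fuel, 0)
def dfsList : Nat → List String → PySem.Set String → String → Bool × PySem.Set String
  | _, [], visited, _ => (false, visited)
  | fuel, n :: rest, visited, node2Value =>
    if PySem.Set.contains visited n then dfsList fuel rest visited node2Value
    else
      let r := dfsB fuel n visited node2Value
      if r.1 then (true, r.2) else dfsList fuel rest r.2 node2Value
  termination_by fuel nbrs _ _ => (fuel, nbrs.length + 1)
end

def connectionDetection_alt (node1Value : String) (node2Value : String) : Bool :=
  (dfsB 32 node1Value PySem.Set.empty node2Value).1

-- ===== PRECONDITION & SPEC =====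
-- Pre_ excludes exactly the inputs where A raises KeyError: node1Value not a key of the fixed
-- graph and different from node2Value (the equality test fires before the first lookup).
def Pre_connectionDetection (node1Value : String) (node2Value : String) : Prop :=
  node1Value = node2Value ∨ node1Value ∈ (["A", "B", "C", "D", "E", "F", "G", "H"] : List String)
instance (node1Value : String) (node2Value : String) : Decidable (Pre_connectionDetection node1Value node2Value) := by unfold Pre_connectionDetection; infer_instance

def pvWitness_connectionDetection : String × String := ("A", "C")

def Spec_connectionDetection (node1Value : String) (node2Value : String) (out : Bool) : Prop := out = connectionDetection_alt node1Value node2Value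
instance (node1Value : String) (node2Value : String) (out : Bool) : Decidable (Spec_connectionDetection node1Value node2Value out) := by unfold Spec_connectionDetection; infer_instance

-- ===== CLAIM (what is proved, stated in full; the proofs are below) =====
def Claim_equal_connectionDetection : Prop := ∀ (node1Value : String) (node2Value : String), Dom_connectionDetection node1Value node2Value → Pre_connectionDetection node1Value node2Value → Spec_connectionDetection node1Value node2Value (connectionDetection node1Value node2Value)

-- ===== LEMMAS AND PROOFS =====
theorem gA : pyGraph.get? "A" = some ["B"] := by decide
theorem gB : pyGraph.get? "B" = some ["A", "C"] := by decide
theorem gC : pyGraph.get? "C" = some ["B"] := by decide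
theorem gD : pyGraph.get? "D" = some ["E"] := by decide
theorem gE : pyGraph.get? "E" = some ["D"] := by decide
theorem gF : pyGraph.get? "F" = some ["G", "H"] := by decide
theorem gG : pyGraph.get? "G" = some ["F"] := by decide
theorem gH : pyGraph.get? "H" = some ["F"] := by decide

-- ===== VERDICT (by name: the statement is the Claim_ definition above) =====
theorem connectionDetection_spec : Claim_equal_connectionDetection := by
  intro n1 n2 _ hpre
  unfold Spec_connectionDetection
  rcases hpre with h | h
  · -- node1Value == node2Value: both return True before any graph lookup
    subst h
    simp [connectionDetection, connectionDetection_alt, connLoop, dfsB]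
  · -- node1Value is a key: case on which, then on node2Value vs its component
    simp only [List.mem_cons, List.not_mem_nil, or_false] at h
    rcases h with h | h | h | h | h | h | h | h <;> subst h
    · by_cases h1 : n2 = "A"; · subst h1; simp [connectionDetection, connectionDetection_alt, connLoop, dfsB, dfsList, gA, gB, gC]
      by_cases h2 : n2 = "B"; · subst h2; simp [connectionDetection, connectionDetection_alt, connLoop, dfsB, dfsList, gA, gB, gC]
      by_cases h3 : n2 = "C"; · subst h3; simp [connectionDetection, connectionDetection_alt, connLoop, dfsB, dfsList, gA, gB, gC]
      have e1 : (("A":String) == n2) = false := beq_eq_false_iff_ne.mpr (Ne.symm h1)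
      have e2 : (("B":String) == n2) = false := beq_eq_false_iff_ne.mpr (Ne.symm h2)
      have e3 : (("C":String) == n2) = false := beq_eq_false_iff_ne.mpr (Ne.symm h3)
      simp [connectionDetection, connectionDetection_alt, connLoop, dfsB, dfsList, gA, gB, gC, e1, e2, e3]
    · by_cases h1 : n2 = "A"; · subst h1; simp [connectionDetection, connectionDetection_alt, connLoop, dfsB, dfsList, gA, gB, gC]
      by_cases h2 : n2 = "B"; · subst h2; simp [connectionDetection, connectionDetection_alt, connLoop, dfsB, dfsList, gA, gB, gC]
      by_cases h3 : n2 = "C"; · subst h3; simp [connectionDetection, connectionDetection_alt, connLoop, dfsB, dfsList, gA, gB, gC]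
      have e1 : (("A":String) == n2) = false := beq_eq_false_iff_ne.mpr (Ne.symm h1)
      have e2 : (("B":String) == n2) = false := beq_eq_false_iff_ne.mpr (Ne.symm h2)
      have e3 : (("C":String) == n2) = false := beq_eq_false_iff_ne.mpr (Ne.symm h3)
      simp [connectionDetection, connectionDetection_alt, connLoop, dfsB, dfsList, gA, gB, gC, e1, e2, e3]
    · by_cases h1 : n2 = "A"; · subst h1; simp [connectionDetection, connectionDetection_alt, connLoop, dfsB, dfsList, gA, gB, gC]
      by_cases h2 : n2 = "B"; · subst h2; simp [connectionDetection, connectionDetection_alt, connLoop, dfsB, dfsList, gA, gB, gC]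
      by_cases h3 : n2 = "C"; · subst h3; simp [connectionDetection, connectionDetection_alt, connLoop, dfsB, dfsList, gA, gB, gC]
      have e1 : (("A":String) == n2) = false := beq_eq_false_iff_ne.mpr (Ne.symm h1)
      have e2 : (("B":String) == n2) = false := beq_eq_false_iff_ne.mpr (Ne.symm h2)
      have e3 : (("C":String) == n2) = false := beq_eq_false_iff_ne.mpr (Ne.symm h3)
      simp [connectionDetection, connectionDetection_alt, connLoop, dfsB, dfsList, gA, gB, gC, e1, e2, e3]
    · by_cases h1 : n2 = "D"; · subst h1; simp [connectionDetection, connectionDetection_alt, connLoop, dfsB, dfsList, gD, gE]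
      by_cases h2 : n2 = "E"; · subst h2; simp [connectionDetection, connectionDetection_alt, connLoop, dfsB, dfsList, gD, gE]
      have e1 : (("D":String) == n2) = false := beq_eq_false_iff_ne.mpr (Ne.symm h1)
      have e2 : (("E":String) == n2) = false := beq_eq_false_iff_ne.mpr (Ne.symm h2)
      simp [connectionDetection, connectionDetection_alt, connLoop, dfsB, dfsList, gD, gE, e1, e2]
    · by_cases h1 : n2 = "D"; · subst h1; simp [connectionDetection, connectionDetection_alt, connLoop, dfsB, dfsList, gD, gE]
      by_cases h2 : n2 = "E"; · subst h2; simp [connectionDetection, connectionDetection_alt, connLoop, dfsB, dfsList, gD, gE]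
      have e1 : (("D":String) == n2) = false := beq_eq_false_iff_ne.mpr (Ne.symm h1)
      have e2 : (("E":String) == n2) = false := beq_eq_false_iff_ne.mpr (Ne.symm h2)
      simp [connectionDetection, connectionDetection_alt, connLoop, dfsB, dfsList, gD, gE, e1, e2]
    · by_cases h1 : n2 = "F"; · subst h1; simp [connectionDetection, connectionDetection_alt, connLoop, dfsB, dfsList, gF, gG, gH]
      by_cases h2 : n2 = "G"; · subst h2; simp [connectionDetection, connectionDetection_alt, connLoop, dfsB, dfsList, gF, gG, gH]
      by_cases h3 : n2 = "H"; · subst h3; simp [connectionDetection, connectionDetection_alt, connLoop, dfsB, dfsList, gF, gG, gH]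
      have e1 : (("F":String) == n2) = false := beq_eq_false_iff_ne.mpr (Ne.symm h1)
      have e2 : (("G":String) == n2) = false := beq_eq_false_iff_ne.mpr (Ne.symm h2)
      have e3 : (("H":String) == n2) = false := beq_eq_false_iff_ne.mpr (Ne.symm h3)
      simp [connectionDetection, connectionDetection_alt, connLoop, dfsB, dfsList, gF, gG, gH, e1, e2, e3]
    · by_cases h1 : n2 = "F"; · subst h1; simp [connectionDetection, connectionDetection_alt, connLoop, dfsB, dfsList, gF, gG, gH]
      by_cases h2 : n2 = "G"; · subst h2; simp [connectionDetection, connectionDetection_alt, connLoop, dfsB, dfsList, gF, gG, gH]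
      by_cases h3 : n2 = "H"; · subst h3; simp [connectionDetection, connectionDetection_alt, connLoop, dfsB, dfsList, gF, gG, gH]
      have e1 : (("F":String) == n2) = false := beq_eq_false_iff_ne.mpr (Ne.symm h1)
      have e2 : (("G":String) == n2) = false := beq_eq_false_iff_ne.mpr (Ne.symm h2)
      have e3 : (("H":String) == n2) = false := beq_eq_false_iff_ne.mpr (Ne.symm h3)
      simp [connectionDetection, connectionDetection_alt, connLoop, dfsB, dfsList, gF, gG, gH, e1, e2, e3]
    · by_cases h1 : n2 = "F"; · subst h1; simp [connectionDetection, connectionDetection_alt, connLoop, dfsB, dfsList, gF, gG, gH]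
      by_cases h2 : n2 = "G"; · subst h2; simp [connectionDetection, connectionDetection_alt, connLoop, dfsB, dfsList, gF, gG, gH]
      by_cases h3 : n2 = "H"; · subst h3; simp [connectionDetection, connectionDetection_alt, connLoop, dfsB, dfsList, gF, gG, gH]
      have e1 : (("F":String) == n2) = false := beq_eq_false_iff_ne.mpr (Ne.symm h1)
      have e2 : (("G":String) == n2) = false := beq_eq_false_iff_ne.mpr (Ne.symm h2)
      have e3 : (("H":String) == n2) = false := beq_eq_false_iff_ne.mpr (Ne.symm h3)
      simp [connectionDetection, connectionDetection_alt, connLoop, dfsB, dfsList, gF, gG, gH, e1, e2, e3]
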